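-- pv_equiv track=rewrite | github.com/bryntje/alphapy | utils/parsers.py | format_days_for_display
-- ===== SOURCE A (Python) =====
-- from typing import Optional, List
--
-- def format_days_for_display(days_list: List[str]) -> str:
--     """
--     Convert day numbers to readable day names for display.
--
--     Args:
--         days_list: List of day numbers (0-6)
--
--     Returns:
--         str: Comma-separated day names
--     """
--     day_names_nl = {
--         "0": "Maandag",
--         "1": "Dinsdag",
--         "2": "Woensdag",
--         "3": "Donderdag",
--         "4": "Vrijdag",
--         "5": "Zaterdag",
--         "6": "Zondag"
--     }
--
--     day_names = [day_names_nl.get(day, f"Day {day}") for day in days_list if day in day_names_nl]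
--     return ", ".join(sorted(day_names, key=lambda x: list(day_names_nl.values()).index(x) if x in day_names_nl.values() else 999))
-- ===== SOURCE B (Python) =====
-- def format_days_for_display(days_list):
--     """
--     Convert day numbers to readable day names for display.
--     """
--     names = ["Maandag", "Dinsdag", "Woensdag", "Donderdag", "Vrijdag", "Zaterdag", "Zondag"]
--     result = []
--     for i, name in enumerate(names):
--         result.extend([name] * days_list.count(str(i)))
--     return ", ".join(result)
-- ===== Notes on version B (the rewrite author's own statement) =====
-- stated objective: idiomatic
-- what changed: B replaces A's filter-map-then-stable-sort-by-index pipeline with a single pass over the seven ordered day keys, emitting each Dutch name days_list.count(key) times, so no sort and no repeated index() scans are needed.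
import Mathlib
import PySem

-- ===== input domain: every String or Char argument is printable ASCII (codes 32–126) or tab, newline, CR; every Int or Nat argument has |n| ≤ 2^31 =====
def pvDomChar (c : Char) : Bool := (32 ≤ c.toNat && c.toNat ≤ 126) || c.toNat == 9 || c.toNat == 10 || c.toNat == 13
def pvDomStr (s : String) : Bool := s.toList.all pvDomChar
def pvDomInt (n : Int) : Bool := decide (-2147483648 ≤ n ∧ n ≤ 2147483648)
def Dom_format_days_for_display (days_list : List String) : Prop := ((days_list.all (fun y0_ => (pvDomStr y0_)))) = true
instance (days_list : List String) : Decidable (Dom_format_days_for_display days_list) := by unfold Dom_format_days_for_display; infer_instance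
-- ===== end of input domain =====

-- B walks the seven day keys in order once, emitting each Dutch name count(key) times — no sort, no index() scans (objective: idiomatic).

-- ===== PORT A =====
def format_days_for_display (days_list : List String) : String :=
  let day_names_nl : PySem.Dict String String :=
    (((((((PySem.Dict.empty.insert "0" "Maandag").insert "1" "Dinsdag").insert "2"
      "Woensdag").insert "3" "Donderdag").insert "4" "Vrijdag").insert "5"
      "Zaterdag").insert "6" "Zondag")
  let day_names := (days_list.filter (fun day => day_names_nl.contains day)).map
      (fun day => day_names_nl.getD day ("Day " ++ day))
  PySem.Str.join ", " (PySem.List.sorted day_names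
    (fun x => if x ∈ day_names_nl.values
              then (((PySem.List.index? day_names_nl.values x).getD 0 : Nat) : Int)
              else 999) false)

-- ===== PORT B =====
def format_days_for_display_alt (days_list : List String) : String :=
  let names := ["Maandag", "Dinsdag", "Woensdag", "Donderdag", "Vrijdag", "Zaterdag", "Zondag"]
  let result := (PySem.List.enumerate names 0).foldl
      (fun acc p => acc ++ PySem.List.pyRepeat [p.2] ((days_list.count (PySem.Int.toStr p.1) : Int))) []
  PySem.Str.join ", " result

-- ===== PRECONDITION & SPEC =====
def Spec_format_days_for_display (days_list : List String) (out : String) : Prop := out = format_days_for_display_alt days_list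
instance (days_list : List String) (out : String) : Decidable (Spec_format_days_for_display days_list out) := by unfold Spec_format_days_for_display; infer_instance

-- ===== CLAIM (what is proved, stated in full; the proofs are below) =====
def Claim_equal_format_days_for_display : Prop := ∀ (days_list : List String), Dom_format_days_for_display days_list → Spec_format_days_for_display days_list (format_days_for_display days_list)

-- ===== LEMMAS AND PROOFS =====

-- proof-local names for the pieces of the two ports
def pvDict : PySem.Dict String String :=
  (((((((PySem.Dict.empty.insert "0" "Maandag").insert "1" "Dinsdag").insert "2"
    "Woensdag").insert "3" "Donderdag").insert "4" "Vrijdag").insert "5"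
    "Zaterdag").insert "6" "Zondag")

def pvKey (x : String) : Int :=
  if x ∈ pvDict.values
  then (((PySem.List.index? pvDict.values x).getD 0 : Nat) : Int)
  else 999

def pvNames : List String := ["Maandag", "Dinsdag", "Woensdag", "Donderdag", "Vrijdag", "Zaterdag", "Zondag"]

def pvDN (dl : List String) : List String :=
  (dl.filter (fun d => pvDict.contains d)).map (fun d => pvDict.getD d ("Day " ++ d))

def pvTgt (dl : List String) : List String :=
  List.replicate (dl.count "0") "Maandag" ++
  (List.replicate (dl.count "1") "Dinsdag" ++
  (List.replicate (dl.count "2") "Woensdag" ++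
  (List.replicate (dl.count "3") "Donderdag" ++
  (List.replicate (dl.count "4") "Vrijdag" ++
  (List.replicate (dl.count "5") "Zaterdag" ++
  (List.replicate (dl.count "6") "Zondag" ++ ([] : List String)))))))

lemma pvA_eq (dl : List String) :
    format_days_for_display dl = PySem.Str.join ", " (PySem.List.sorted (pvDN dl) pvKey false) := rfl

lemma pvB_eq (dl : List String) :
    format_days_for_display_alt dl = PySem.Str.join ", " (pvTgt dl) := by
  simp [format_days_for_display_alt, pvTgt, PySem.List.enumerate, List.foldl,
    PySem.List.pyRepeat_singleton, List.append_assoc,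
    (show PySem.Int.toStr 0 = "0" from rfl), (show PySem.Int.toStr 1 = "1" from rfl),
    (show PySem.Int.toStr 2 = "2" from rfl), (show PySem.Int.toStr 3 = "3" from rfl),
    (show PySem.Int.toStr 4 = "4" from rfl), (show PySem.Int.toStr 5 = "5" from rfl),
    (show PySem.Int.toStr 6 = "6" from rfl)]

-- a key-nondecreasing arrangement is unique when the key separates the elements present
lemma pv_sorted_unique {α : Type} (key : α → Int) :
    ∀ (l₁ l₂ : List α), l₁.Perm l₂ →
      l₁.Pairwise (fun a b => key a ≤ key b) → l₂.Pairwise (fun a b => key a ≤ key b) →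
      (∀ a ∈ l₁, ∀ b ∈ l₂, key a = key b → a = b) → l₁ = l₂ := by
  intro l₁
  induction l₁ with
  | nil => intro l₂ hp _ _ _; exact (hp.nil_eq).symm ▸ rfl
  | cons a t ih =>
    intro l₂ hp h1 h2 hinj
    cases l₂ with
    | nil => exact absurd hp.symm (by simp)
    | cons b t₂ =>
      have hab : a = b := by
        by_cases h0 : a = b
        · exact h0
        · have ha2 : a ∈ t₂ := by
            rcases List.mem_cons.mp (hp.mem_iff.mp (List.mem_cons_self ..)) with h | h
            · exact absurd h h0
            · exact h
          have hb1 : b ∈ t := by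
            rcases List.mem_cons.mp (hp.mem_iff.mpr (List.mem_cons_self ..)) with h | h
            · exact absurd h.symm h0
            · exact h
          exact hinj a (List.mem_cons_self ..) b (List.mem_cons_self ..)
            (le_antisymm (List.rel_of_pairwise_cons h1 hb1) (List.rel_of_pairwise_cons h2 ha2))
      subst hab
      rw [ih t₂ hp.cons_inv h1.of_cons h2.of_cons
        (fun x hx y hy => hinj x (List.mem_cons_of_mem _ hx) y (List.mem_cons_of_mem _ hy))]

lemma pv_contains_false {d : String} (h0 : d ≠ "0") (h1 : d ≠ "1") (h2 : d ≠ "2")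
    (h3 : d ≠ "3") (h4 : d ≠ "4") (h5 : d ≠ "5") (h6 : d ≠ "6") :
    pvDict.contains d = false := by
  rw [PySem.Dict.contains_eq_decide_mem_keys,
    (show pvDict.keys = ["0", "1", "2", "3", "4", "5", "6"] from rfl)]
  simp [h0, h1, h2, h3, h4, h5, h6]

lemma pv_count (dl : List String) (x : String) : (pvDN dl).count x = (pvTgt dl).count x := by
  induction dl with
  | nil => simp [pvDN, pvTgt]
  | cons d t ih =>
    by_cases h0 : d = "0"
    · subst h0
      simp [pvDN, pvTgt, List.count_cons, List.count_append, List.count_replicate,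
        List.replicate_succ, (show pvDict.contains "0" = true from rfl),
        (show pvDict.getD "0" "Day 0" = "Maandag" from rfl)] at *
      omega
    · by_cases h1 : d = "1"
      · subst h1
        simp [pvDN, pvTgt, List.count_cons, List.count_append, List.count_replicate,
          List.replicate_succ, (show pvDict.contains "1" = true from rfl),
          (show pvDict.getD "1" "Day 1" = "Dinsdag" from rfl)] at *
        omega
      · by_cases h2 : d = "2"
        · subst h2
          simp [pvDN, pvTgt, List.count_cons, List.count_append, List.count_replicate,
            List.replicate_succ, (show pvDict.contains "2" = true from rfl),
            (show pvDict.getD "2" "Day 2" = "Woensdag" from rfl)] at *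
          omega
        · by_cases h3 : d = "3"
          · subst h3
            simp [pvDN, pvTgt, List.count_cons, List.count_append, List.count_replicate,
              List.replicate_succ, (show pvDict.contains "3" = true from rfl),
              (show pvDict.getD "3" "Day 3" = "Donderdag" from rfl)] at *
            omega
          · by_cases h4 : d = "4"
            · subst h4
              simp [pvDN, pvTgt, List.count_cons, List.count_append, List.count_replicate,
                List.replicate_succ, (show pvDict.contains "4" = true from rfl),
                (show pvDict.getD "4" "Day 4" = "Vrijdag" from rfl)] at *
              omega
            · by_cases h5 : d = "5"
              · subst h5
                simp [pvDN, pvTgt, List.count_cons, List.count_append, List.count_replicate,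
                  List.replicate_succ, (show pvDict.contains "5" = true from rfl),
                  (show pvDict.getD "5" "Day 5" = "Zaterdag" from rfl)] at *
                omega
              · by_cases h6 : d = "6"
                · subst h6
                  simp [pvDN, pvTgt, List.count_cons, List.count_append, List.count_replicate,
                    List.replicate_succ, (show pvDict.contains "6" = true from rfl),
                    (show pvDict.getD "6" "Day 6" = "Zondag" from rfl)] at *
                  omega
                · have hc := pv_contains_false h0 h1 h2 h3 h4 h5 h6
                  simp [pvDN, pvTgt, List.count_cons, List.count_append, List.count_replicate,
                    hc, h0, h1, h2, h3,
                    h4, h5, h6] at *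
                  omega

lemma pv_perm (dl : List String) : (pvDN dl).Perm (pvTgt dl) :=
  List.perm_iff_count.mpr (fun x => pv_count dl x)

lemma pv_mem_DN {dl : List String} {x : String} (h : x ∈ pvDN dl) : x ∈ pvNames := by
  simp only [pvDN, List.mem_map, List.mem_filter] at h
  obtain ⟨d, ⟨-, hc⟩, rfl⟩ := h
  rw [PySem.Dict.contains_eq_decide_mem_keys,
    (show pvDict.keys = ["0", "1", "2", "3", "4", "5", "6"] from rfl),
    decide_eq_true_iff] at hc
  fin_cases hc <;> decide

lemma pv_mem_tgt {dl : List String} {x : String} (h : x ∈ pvTgt dl) : x ∈ pvNames := by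
  simp only [pvTgt, List.mem_append, List.mem_replicate, List.not_mem_nil, or_false] at h
  rcases h with ⟨-, rfl⟩ | ⟨-, rfl⟩ | ⟨-, rfl⟩ | ⟨-, rfl⟩ | ⟨-, rfl⟩ | ⟨-, rfl⟩ | ⟨-, rfl⟩ <;> decide

lemma pv_inj : ∀ a ∈ pvNames, ∀ b ∈ pvNames, pvKey a = pvKey b → a = b := by decide

lemma pv_pairwise_tgt (dl : List String) : (pvTgt dl).Pairwise (fun a b => pvKey a ≤ pvKey b) := by
  simp only [pvTgt, List.pairwise_append, List.mem_append, List.mem_replicate,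
    List.not_mem_nil, or_false]
  repeat' apply And.intro
  all_goals first
    | exact List.Pairwise.nil
    | exact List.pairwise_replicate.mpr (Or.inr (by decide))
    | (rintro a ⟨-, rfl⟩ b (⟨-, rfl⟩ | ⟨-, rfl⟩ | ⟨-, rfl⟩ | ⟨-, rfl⟩ | ⟨-, rfl⟩ | ⟨-, rfl⟩) <;> decide)
    | (rintro a ⟨-, rfl⟩ b (⟨-, rfl⟩ | ⟨-, rfl⟩ | ⟨-, rfl⟩ | ⟨-, rfl⟩ | ⟨-, rfl⟩) <;> decide)
    | (rintro a ⟨-, rfl⟩ b (⟨-, rfl⟩ | ⟨-, rfl⟩ | ⟨-, rfl⟩ | ⟨-, rfl⟩) <;> decide)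
    | (rintro a ⟨-, rfl⟩ b (⟨-, rfl⟩ | ⟨-, rfl⟩ | ⟨-, rfl⟩) <;> decide)
    | (rintro a ⟨-, rfl⟩ b (⟨-, rfl⟩ | ⟨-, rfl⟩) <;> decide)
    | (rintro a ⟨-, rfl⟩ b ⟨-, rfl⟩; decide)

lemma pv_sort_eq (dl : List String) : PySem.List.sorted (pvDN dl) pvKey false = pvTgt dl := by
  refine pv_sorted_unique pvKey _ _ ((PySem.List.sorted_perm _ _ _).trans (pv_perm dl))
    (PySem.List.sorted_pairwise _ _) (pv_pairwise_tgt dl) ?_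
  intro a ha b hb
  exact pv_inj a (pv_mem_DN ((PySem.List.mem_sorted _ _ _ _).mp ha)) b (pv_mem_tgt hb)

-- ===== VERDICT (by name: the statement is the Claim_ definition above) =====
theorem format_days_for_display_spec : Claim_equal_format_days_for_display := by
  intro dl _
  unfold Spec_format_days_for_display
  rw [pvA_eq, pvB_eq, pv_sort_eq]
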